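/- GENERATED by tools/from_farm_form.py from farm.toyh/worked/run_ctors/Lemmas.lean (a worked proof of the farm's unit `run_ctors`,
   accepted by the verdict) — do not edit. -/
import Toyh.Spec.Units.run_ctors
import Asan.CheckWalk
/-
  Pure facts for the unit `run_ctors`: the shadow after `registerMem` depends only on the shadow before; the descriptor table stays
  in memory under stack stores; the constants of this image's runtime record as the walker's literals.
-/

open X86 X86.User Asan ProgX.Base

namespace Toyh.Spec.Proved.run_ctors
open Toyh.Spec.run_ctors (Statement)

/-- Two memories that agree on a range still agree on it after the same byte store into both. -/
theorem eqOn_write_w {lo hi : Nat} {m m' : Mem} (h : Mem.EqOn lo hi m m') (b : Word) (v : Byte) :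
    Mem.EqOn lo hi (m.write b v) (m'.write b v) := by
  intro a ha hb
  by_cases e : b = a
  · subst e
    rw [Mem.read_write_same, Mem.read_write_same]
  · rw [Mem.read_write_other _ _ _ _ e, Mem.read_write_other _ _ _ _ e]
    exact h a ha hb

/-- … after the same run of shadow stores (`fillMem`) into both. -/
theorem eqOn_fillMem_w {lo hi : Nat} {m m' : Mem} (h : Mem.EqOn lo hi m m') (g : Nat) (v : Byte) (k : Nat) :
    Mem.EqOn lo hi (fillMem m g v k) (fillMem m' g v k) := by
  induction k generalizing m m' g with
  | zero => exact h
  | succ k ih =>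
    simp only [fillMem]
    exact ih (eqOn_write_w h _ _) (g + 1)

/-- … after the registration of one global in both. -/
theorem eqOn_registerOne_w {lo hi : Nat} {m m' : Mem} (h : Mem.EqOn lo hi m m') (d : GlobalDesc) :
    Mem.EqOn lo hi (registerOne m d) (registerOne m' d) := by
  unfold registerOne
  apply eqOn_fillMem_w
  by_cases e : (d.beg + d.size) % 8 = 0
  · rw [if_pos e, if_pos e]
    exact h
  · rw [if_neg e, if_neg e]
    exact eqOn_write_w h _ _

/-- **`registerMem` depends on the range only through the range**: two memories that agree on a range (the shadow) agree on it
after the registration of the same descriptors. -/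
theorem eqOn_registerMem_w {lo hi : Nat} {m m' : Mem} (h : Mem.EqOn lo hi m m') (ds : List GlobalDesc) :
    Mem.EqOn lo hi (registerMem m ds) (registerMem m' ds) := by
  induction ds generalizing m m' with
  | nil => exact h
  | cons d ds ih =>
    have e1 : registerMem m (d :: ds) = registerMem (registerOne m d) ds := rfl
    have e2 : registerMem m' (d :: ds) = registerMem (registerOne m' d) ds := rfl
    rw [e1, e2]
    exact ih (eqOn_registerOne_w h d)


/-- **The descriptor table stays in memory** under stores that leave a range `[lo, hi)` around the table alone. -/
theorem descsIn_eqOn_w {lo hi : Nat} {m m' : Mem} {table : Nat} {descs : List GlobalDesc} (h : Mem.EqOn lo hi m m')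
    (hlo : lo ≤ table) (hhi : table + 64 * descs.length ≤ hi) (hmax : hi < 2 ^ 63) (hd : DescsIn m table descs) :
    DescsIn m' table descs := by
  intro i hi'
  obtain ⟨h1, h2, h3⟩ := hd i hi'
  have e1 : (UInt64.ofNat (table + 64 * i)).toNat = table + 64 * i := by
    rw [UInt64.toNat_ofNat']
    omega
  have e2 : (UInt64.ofNat (table + 64 * i + 8)).toNat = table + 64 * i + 8 := by
    rw [UInt64.toNat_ofNat']
    omega
  have e3 : (UInt64.ofNat (table + 64 * i + 16)).toNat = table + 64 * i + 16 := by
    rw [UInt64.toNat_ofNat']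
    omega
  refine ⟨?_, ?_, ?_⟩
  · rw [h.readLE _ 8 (by omega) (by omega) (by omega)]
    exact h1
  · rw [h.readLE _ 8 (by omega) (by omega) (by omega)]
    exact h2
  · rw [h.readLE _ 8 (by omega) (by omega) (by omega)]
    exact h3


/-- `__init_array_start` of this image, in the form the walker gives `ebx` after `mov ebx, 0x141000`. -/
theorem initStart_w : UInt64.ofNat rt.sym.initArrayStart = Word.ofBV 1314816#32 := by decide

/-- The constructor of the runtime record is the label `_sub_I_65535_1`. -/
theorem ctorEntry_w : rt.sym.ctor = Toyh.L._sub_I_65535_1.entry := by decide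

/-- The descriptor table of this image lies in the image's data, below the stack region. -/
theorem table_bounds_w : 0x100000 ≤ rt.table ∧ rt.table + 64 * rt.descs.length ≤ 0x700000 := by decide

/-- The windows of the constructor's contract, evaluated: the shadow of the one slot of this image's globals. -/
theorem ctor_writes_w (u : State) : (ctorSpec rt).writes u =
    [⟨12747552, 12747560⟩] := id rfl

/-- The windows of `run_ctors`' own contract, evaluated: the same one. -/
theorem runCtors_writes_w (u : State) : (runCtorsSpec rt).writes u =
    [⟨12747552, 12747560⟩] := id rfl

end Toyh.Spec.Proved.run_ctors
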